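-- pv_equiv track=rewrite | github.com/Duh97/git_Exchange | Patent/source code/GUI/crawler/Preprocessing_Number.py | check_keyword
-- ===== SOURCE A (Python) =====
-- def check_keyword(number_word_match_dict):
--  keyword_dict = dict()
--  # 計算頻率
--  for key, value in number_word_match_dict.items():
--   word_list = []
--   frequrncy_dict = dict()  # 儲存對應單字出現在number_word_match_dict的次數
--   # 把重複的字串刪除
--   for word in value:
--    if (word not in word_list):
--     word_list.append(word)
--   # 計算頻率
--   for word in word_list:
--    frequrncy = value.count(word)
--    frequrncy_dict.update({word: frequrncy})
--    # 將頻率由大到小排序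
--    frequrncy_dict = dict(sorted(frequrncy_dict.items(), key=lambda x: x[1], reverse=True))
--   # 取frequrncy_dict中頻率最高的兩個關鍵字
--   keyword = [word for word in frequrncy_dict.keys()][:2]
--   if len(keyword)==1:
--    newDic = []
--    newDic.append(keyword[0])
--    newDic.append(keyword[0])
--    keyword = newDic
--   elif len(keyword)==2:
--    keyword_dict.update({key: keyword})
--  return keyword_dict
-- ===== SOURCE B (Python) =====
-- def check_keyword(number_word_match_dict):
--     keyword_dict = {}
--     for key, value in number_word_match_dict.items():
--         counts = {}
--         for word in value:
--             counts[word] = counts.get(word, 0) + 1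
--         best1 = None  # (word, freq) with highest freq, earliest first appearance on ties
--         best2 = None  # runner-up under the same rule
--         for word, freq in counts.items():
--             if best1 is None:
--                 best1 = (word, freq)
--             elif freq > best1[1]:
--                 best2 = best1
--                 best1 = (word, freq)
--             elif best2 is None or freq > best2[1]:
--                 best2 = (word, freq)
--         if best2 is not None:
--             keyword_dict[key] = [best1[0], best2[0]]
--     return keyword_dict
-- ===== Notes on version B (the rewrite author's own statement) =====
-- stated objective: faster
-- what changed: A dedups the value, calls value.count per distinct word and re-sorts the whole frequency dict after every insertion, then takes the first two keys; B counts all frequencies in one pass over the value and picks the top two (ties by first appearance) with a single best1/best2 scan, with no sorting and no repeated counting.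
import Mathlib
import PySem

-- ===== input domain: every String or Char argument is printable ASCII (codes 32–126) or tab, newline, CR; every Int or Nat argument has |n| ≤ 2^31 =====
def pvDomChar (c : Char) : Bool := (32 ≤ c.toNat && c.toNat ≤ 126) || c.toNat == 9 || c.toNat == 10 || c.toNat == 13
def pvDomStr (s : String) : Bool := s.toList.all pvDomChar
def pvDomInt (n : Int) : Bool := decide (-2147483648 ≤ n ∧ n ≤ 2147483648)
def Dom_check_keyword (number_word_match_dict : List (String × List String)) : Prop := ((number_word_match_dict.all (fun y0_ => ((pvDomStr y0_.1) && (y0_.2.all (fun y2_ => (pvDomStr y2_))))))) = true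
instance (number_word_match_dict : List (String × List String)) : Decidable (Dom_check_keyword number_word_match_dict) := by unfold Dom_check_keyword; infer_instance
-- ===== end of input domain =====

-- B replaces A's repeated re-sorting of a frequency dict (re-sorted after every insertion) by a
-- single counting pass plus a one-pass best1/best2 scan; equivalence of the RETURN value is proved.

-- ===== PORT A =====
def check_keyword (number_word_match_dict : List (String × List String)) : List (String × List String) :=
  (number_word_match_dict.foldl
    (fun (keyword_dict : PySem.Dict String (List String)) kv =>
      let key := kv.1
      let value := kv.2
      -- word_list: delete duplicated words (keep first occurrences)
      let word_list : List String :=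
        value.foldl (fun word_list word => if word ∈ word_list then word_list else word_list ++ [word]) []
      -- frequency dict, rebuilt sorted (descending by frequency, stable) after every insertion
      let frequrncy_dict : PySem.Dict String Int :=
        word_list.foldl
          (fun frequrncy_dict word =>
            PySem.Dict.ofList (PySem.List.sorted ((frequrncy_dict.insert word (PySem.List.count value word)).items) (fun x => x.2) true))
          PySem.Dict.empty
      -- keyword = [word for word in frequrncy_dict.keys()][:2]
      let keyword : List String := PySem.List.slice (frequrncy_dict.keys.map (fun word => word)) none (some 2)
      if keyword.length = 1 then
        keyword_dict  -- A builds newDic = [keyword[0], keyword[0]] here but never stores it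
      else if keyword.length = 2 then keyword_dict.insert key keyword
      else keyword_dict)
    PySem.Dict.empty).items

-- ===== PORT B =====
def check_keyword_alt (number_word_match_dict : List (String × List String)) : List (String × List String) :=
  (number_word_match_dict.foldl
    (fun (keyword_dict : PySem.Dict String (List String)) kv =>
      let key := kv.1
      let value := kv.2
      let counts : PySem.Dict String Int :=
        value.foldl (fun counts word => counts.insert word (counts.getD word 0 + 1)) PySem.Dict.empty
      let bests : Option (String × Int) × Option (String × Int) :=
        counts.items.foldl
          (fun bests p =>
            match bests with
            | (none, b2) => (some p, b2)
            | (some b1, none) => if b1.2 < p.2 then (some p, some b1) else (some b1, some p)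
            | (some b1, some b2) =>
                if b1.2 < p.2 then (some p, some b1)
                else if b2.2 < p.2 then (some b1, some p)
                else (some b1, some b2))
          (none, none)
      match bests with
      | (some b1, some b2) => keyword_dict.insert key [b1.1, b2.1]
      | _ => keyword_dict)
    PySem.Dict.empty).items

-- ===== PRECONDITION & SPEC =====
def Spec_check_keyword (number_word_match_dict : List (String × List String)) (out : List (String × List String)) : Prop := out = check_keyword_alt number_word_match_dict
instance (number_word_match_dict : List (String × List String)) (out : List (String × List String)) : Decidable (Spec_check_keyword number_word_match_dict out) := by unfold Spec_check_keyword; infer_instance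

-- ===== CLAIM (what is proved, stated in full; the proofs are below) =====
def Claim_equal_check_keyword : Prop := ∀ (number_word_match_dict : List (String × List String)), Dom_check_keyword number_word_match_dict → Spec_check_keyword number_word_match_dict (check_keyword number_word_match_dict)

-- ===== LEMMAS AND PROOFS =====

-- first two elements of a list, as B's (best1, best2) state
def topTwo (l : List (String × Int)) : Option (String × Int) × Option (String × Int) :=
  match l with
  | [] => (none, none)
  | [a] => (some a, none)
  | a :: b :: _ => (some a, some b)

-- stable reverse sort of xs ++ [p] = insert p into the sorted xs, behind all keys ≥ key p
theorem sorted_rev_append_singleton {α κ : Type} [LT κ] [DecidableLT κ] (xs : List α) (p : α) (key : α → κ) :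
    PySem.List.sorted (xs ++ [p]) key true
      = PySem.List.insertBy (fun a b => decide (key b < key a)) p (PySem.List.sorted xs key true) := by
  rw [PySem.List.sorted_rev_eq_foldl_insertBy, PySem.List.sorted_rev_eq_foldl_insertBy, List.foldl_append]
  rfl

-- dict() of an association list with distinct keys has exactly that items list
theorem ofList_items_of_nodup {l : List (String × Int)} (h : (l.map Prod.fst).Nodup) :
    (PySem.Dict.ofList l).items = l := by
  have := PySem.Dict.items_foldl_insert_fresh l Prod.fst Prod.snd PySem.Dict.empty
    (by intro a _; exact PySem.Dict.contains_empty _) h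
  simpa [PySem.Dict.ofList, PySem.Dict.update] using this

-- A's inner loop: insert then re-sort, starting from {}  =  one reverse-stable sort of all pairs
theorem fd_items (c : String → Int) : ∀ (ws : List String), ws.Nodup →
    (ws.foldl
        (fun fd w => PySem.Dict.ofList (PySem.List.sorted ((PySem.Dict.insert fd w (c w)).items) (fun x => x.2) true))
        PySem.Dict.empty).items
      = PySem.List.sorted (ws.map (fun w => (w, c w))) (fun x => x.2) true := by
  intro ws
  induction ws using List.reverseRecOn with
  | nil => intro _; rfl
  | append_singleton t w ih =>
    intro hnd
    obtain ⟨ht, -, hdisj⟩ := List.nodup_append.mp hnd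
    have hw : w ∉ t := fun hmem => (hdisj w hmem w (List.mem_singleton_self w)) rfl
    rw [List.foldl_append, List.foldl_cons, List.foldl_nil]
    set F := (t.foldl
        (fun fd w => PySem.Dict.ofList (PySem.List.sorted ((PySem.Dict.insert fd w (c w)).items) (fun x => x.2) true))
        PySem.Dict.empty) with hF
    have hitems : F.items = PySem.List.sorted (t.map (fun w => (w, c w))) (fun x => x.2) true := ih ht
    have hc : F.contains w = false := by
      rw [Bool.eq_false_iff]
      intro hcontains
      rw [PySem.Dict.contains_iff_mem_keys] at hcontains
      have : w ∈ t := by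
        have := hcontains
        simp only [PySem.Dict.keys, hitems, List.mem_map, PySem.List.mem_sorted] at this
        obtain ⟨p, ⟨a, ha, rfl⟩, hfst⟩ := this
        simpa [← hfst] using ha
      exact hw this
    rw [PySem.Dict.items_insert_of_not_contains _ _ hc, hitems]
    have hsortsort := PySem.List.sorted_rev_sorted_rev (t.map (fun w => (w, c w))) (fun x : String × Int => x.2)
    rw [sorted_rev_append_singleton, hsortsort, ← sorted_rev_append_singleton]
    simp only [List.map_append, List.map_cons, List.map_nil]
    have hperm := PySem.List.sorted_perm (List.map (fun w => (w, c w)) t ++ [(w, c w)]) (fun x : String × Int => x.2) true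
    apply ofList_items_of_nodup
    refine ((hperm.map Prod.fst).nodup_iff).mpr ?_
    simpa [Function.comp_def] using hnd

-- B's scan computes the first two entries of the reverse-stable sort
theorem scan_top2 (L : List (String × Int)) :
    L.foldl
        (fun bests p =>
          match bests with
          | (none, b2) => (some p, b2)
          | (some b1, none) => if b1.2 < p.2 then (some p, some b1) else (some b1, some p)
          | (some b1, some b2) =>
              if b1.2 < p.2 then (some p, some b1)
              else if b2.2 < p.2 then (some b1, some p)
              else (some b1, some b2))
        (none, none)
      = topTwo (PySem.List.sorted L (fun x => x.2) true) := by
  induction L using List.reverseRecOn with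
  | nil => rfl
  | append_singleton t p ih =>
    rw [List.foldl_append, List.foldl_cons, List.foldl_nil, ih, sorted_rev_append_singleton]
    rcases hS : PySem.List.sorted t (fun x => x.2) true with _ | ⟨a, _ | ⟨b, r⟩⟩
    · rfl
    · simp only [topTwo, PySem.List.insertBy]
      by_cases h : a.2 < p.2 <;> simp [h]
    · simp only [topTwo, PySem.List.insertBy]
      by_cases h1 : a.2 < p.2
      · simp [h1]
      · by_cases h2 : b.2 < p.2 <;> simp [h1, h2]

-- per-entry agreement of the two loop bodies
theorem entry_eq (keyword_dict : PySem.Dict String (List String)) (kv : String × List String) :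
    (fun (keyword_dict : PySem.Dict String (List String)) kv =>
      let key := kv.1
      let value := kv.2
      let word_list : List String :=
        value.foldl (fun word_list word => if word ∈ word_list then word_list else word_list ++ [word]) []
      let frequrncy_dict : PySem.Dict String Int :=
        word_list.foldl
          (fun frequrncy_dict word =>
            PySem.Dict.ofList (PySem.List.sorted ((frequrncy_dict.insert word (PySem.List.count value word)).items) (fun x => x.2) true))
          PySem.Dict.empty
      let keyword : List String := PySem.List.slice (frequrncy_dict.keys.map (fun word => word)) none (some 2)
      if keyword.length = 1 then
        keyword_dict
      else if keyword.length = 2 then keyword_dict.insert key keyword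
      else keyword_dict) keyword_dict kv
    = (fun (keyword_dict : PySem.Dict String (List String)) kv =>
      let key := kv.1
      let value := kv.2
      let counts : PySem.Dict String Int :=
        value.foldl (fun counts word => counts.insert word (counts.getD word 0 + 1)) PySem.Dict.empty
      let bests : Option (String × Int) × Option (String × Int) :=
        counts.items.foldl
          (fun bests p =>
            match bests with
            | (none, b2) => (some p, b2)
            | (some b1, none) => if b1.2 < p.2 then (some p, some b1) else (some b1, some p)
            | (some b1, some b2) =>
                if b1.2 < p.2 then (some p, some b1)
                else if b2.2 < p.2 then (some b1, some p)
                else (some b1, some b2))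
          (none, none)
      match bests with
      | (some b1, some b2) => keyword_dict.insert key [b1.1, b2.1]
      | _ => keyword_dict) keyword_dict kv := by
  dsimp only
  have hwl : kv.2.foldl (fun wl w => if w ∈ wl then wl else wl ++ [w]) ([] : List String)
      = PySem.Set.ofList kv.2 := by
    have hfun : (fun (wl : List String) w => if w ∈ wl then wl else wl ++ [w]) = PySem.Set.add := by
      funext s x; simp [PySem.Set.add, PySem.Set.contains]
    rw [hfun]; rfl
  have hmapf : (fun (w : String) => (w, (PySem.List.count kv.2 w : Int))) = (fun k => (k, (List.count k kv.2 : Int))) := by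
    funext w; simp [PySem.List.count_eq]
  have hfd : ((PySem.Set.ofList kv.2).foldl
        (fun fd w => PySem.Dict.ofList (PySem.List.sorted ((PySem.Dict.insert fd w ((PySem.List.count kv.2 w : Int)))).items (fun x => x.2) true))
        PySem.Dict.empty).items
      = PySem.List.sorted ((PySem.Set.ofList kv.2).map (fun k => (k, (List.count k kv.2 : Int)))) (fun x => x.2) true := by
    rw [fd_items (fun w => (PySem.List.count kv.2 w : Int)) _ (PySem.Set.nodup_ofList kv.2), hmapf]
  have hcounts : (kv.2.foldl (fun (counts : PySem.Dict String Int) word => counts.insert word (counts.getD word 0 + 1)) PySem.Dict.empty).items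
      = (PySem.Set.ofList kv.2).map (fun k => (k, (List.count k kv.2 : Int))) := by
    rw [PySem.Dict.foldl_insert_getD_add_one_eq_counter, PySem.Dict.items_counter]
  rw [hwl, hcounts, scan_top2]
  simp only [PySem.Dict.keys]
  rw [hfd]
  rw [show (fun (word : String) => word) = id from rfl, List.map_id]
  rw [PySem.List.slice_to _ (by norm_num)]
  rcases PySem.List.sorted ((PySem.Set.ofList kv.2).map (fun k => (k, (List.count k kv.2 : Int)))) (fun x => x.2) true
    with _ | ⟨a, _ | ⟨b, r⟩⟩ <;> simp [topTwo]

-- ===== VERDICT (by name: the statement is the Claim_ definition above) =====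
theorem check_keyword_spec : Claim_equal_check_keyword := by
  intro number_word_match_dict _
  unfold Spec_check_keyword check_keyword check_keyword_alt
  exact congrArg PySem.Dict.items (List.foldl_ext _ _ _ (fun kd kv _ => entry_eq kd kv))
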